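-- pv_equiv track=rewrite | github.com/umeshkumarsahoo/leet-code-daily | 0826-most-profit-assigning-work/0826-most-profit-assigning-work.py | maxProfitAssignment
-- ===== SOURCE A (Python) =====
-- from typing import List
--
-- def maxProfitAssignment(difficulty: List[int], profit: List[int], worker: List[int]) -> int:
--     jobs = sorted(zip(difficulty, profit))
--     worker.sort()
--
--     res = 0
--     j = 0
--     best = 0
--
--     for work in worker:
--         while j < len(jobs) and work >= jobs[j][0]:
--             best = max(best, jobs[j][1])
--             j += 1
--         res += best
--
--     return res
-- ===== SOURCE B (Python) =====
-- from typing import List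
--
-- # Sort jobs once, build a prefix-maximum-profit array, then answer each worker
-- # independently by binary search (rightmost job with difficulty <= skill).
-- # worker.sort() is kept so A's observable in-place mutation of `worker` is preserved.
-- def maxProfitAssignment(difficulty: List[int], profit: List[int], worker: List[int]) -> int:
--     jobs = sorted(zip(difficulty, profit))
--     worker.sort()
--
--     diffs = []
--     pmax = []
--     cur = 0
--     for d, p in jobs:
--         cur = max(cur, p)
--         diffs.append(d)
--         pmax.append(cur)
--
--     total = 0
--     for w in worker:
--         lo, hi = 0, len(diffs)
--         while lo < hi:
--             mid = (lo + hi) // 2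
--             if diffs[mid] <= w:
--                 lo = mid + 1
--             else:
--                 hi = mid
--         total += pmax[lo - 1] if lo else 0
--     return total
-- ===== Notes on version B (the rewrite author's own statement) =====
-- stated objective: alternative
-- what changed: Replaces A's stateful two-pointer sweep (shared j/best carried across sorted workers) by a prefix-maximum-profit array over the sorted jobs plus an independent binary search per worker; worker.sort() is kept so A's in-place mutation of worker is preserved.
import Mathlib
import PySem

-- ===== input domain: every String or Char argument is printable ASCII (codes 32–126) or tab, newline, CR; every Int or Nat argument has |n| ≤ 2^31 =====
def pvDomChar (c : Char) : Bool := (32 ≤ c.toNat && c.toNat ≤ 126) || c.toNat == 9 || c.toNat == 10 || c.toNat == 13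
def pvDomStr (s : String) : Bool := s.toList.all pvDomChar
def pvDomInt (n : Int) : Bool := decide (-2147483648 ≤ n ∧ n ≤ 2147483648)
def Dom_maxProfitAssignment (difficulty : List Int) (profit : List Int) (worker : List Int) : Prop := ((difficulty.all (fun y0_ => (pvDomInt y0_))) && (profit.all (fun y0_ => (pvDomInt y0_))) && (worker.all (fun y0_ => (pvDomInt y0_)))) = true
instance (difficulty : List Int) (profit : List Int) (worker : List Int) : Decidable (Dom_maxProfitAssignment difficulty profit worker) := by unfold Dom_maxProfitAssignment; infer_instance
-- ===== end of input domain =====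

-- B replaces A's stateful two-pointer sweep by a prefix-maximum array plus a binary
-- search per worker (objective: alternative/idiomatic; same asymptotic cost).
-- Both Pythons sort `worker` IN PLACE (worker.sort()); the equivalence proved here is
-- about the return value, and B performs the same mutation.

-- ===== PORT A =====
-- the `while j < len(jobs) and work >= jobs[j][0]` inner loop of A
def advA (jobs : List (Int × Int)) (work : Int) (j : Nat) (best : Int) : Nat × Int :=
  if h : j < jobs.length then
    if jobs[j].1 ≤ work then advA jobs work (j + 1) (max best jobs[j].2)
    else (j, best)
  else (j, best)
termination_by jobs.length - j

def maxProfitAssignment (difficulty : List Int) (profit : List Int) (worker : List Int) : Int :=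
  let jobs := PySem.List.sorted2 (difficulty.zip profit) (fun x => x.1) (fun x => x.2)
  let workerS := PySem.List.sorted worker (fun x => x)
  -- state (res, j, best); `res += best` after the inner while loop
  let st := workerS.foldl (fun (st : Int × Nat × Int) work =>
    let jb := advA jobs work st.2.1 st.2.2
    (st.1 + jb.2, jb.1, jb.2)) (0, 0, 0)
  st.1

-- ===== PORT B =====
-- the `while lo < hi` binary-search loop of B (lo, hi are in-range nonnegative Python
-- ints, so `(lo+hi)//2` is Nat division and `diffs[mid]` is `getD mid`, both exact)
def bsearchB (diffs : List Int) (w : Int) (lo hi : Nat) : Nat :=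
  if _h : lo < hi then
    let mid := (lo + hi) / 2
    if diffs.getD mid 0 ≤ w then bsearchB diffs w (mid + 1) hi
    else bsearchB diffs w lo mid
  else lo
termination_by hi - lo
decreasing_by all_goals omega

def maxProfitAssignment_alt (difficulty : List Int) (profit : List Int) (worker : List Int) : Int :=
  let jobs := PySem.List.sorted2 (difficulty.zip profit) (fun x => x.1) (fun x => x.2)
  let workerS := PySem.List.sorted worker (fun x => x)
  -- build diffs and the prefix-maximum-profit array pmax in one pass over jobs
  let t := jobs.foldl (fun (st : List Int × List Int × Int) dp =>
    let cur := max st.2.2 dp.2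
    (st.1 ++ [dp.1], st.2.1 ++ [cur], cur)) ([], [], 0)
  let diffs := t.1
  let pmax := t.2.1
  -- each worker independently: rightmost job with difficulty ≤ w, add its prefix max
  workerS.foldl (fun total w =>
    let lo := bsearchB diffs w 0 diffs.length
    total + (if lo ≠ 0 then pmax.getD (lo - 1) 0 else 0)) 0

-- ===== PRECONDITION & SPEC =====
def Spec_maxProfitAssignment (difficulty : List Int) (profit : List Int) (worker : List Int) (out : Int) : Prop := out = maxProfitAssignment_alt difficulty profit worker
instance (difficulty : List Int) (profit : List Int) (worker : List Int) (out : Int) : Decidable (Spec_maxProfitAssignment difficulty profit worker out) := by unfold Spec_maxProfitAssignment; infer_instance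

-- ===== CLAIM (what is proved, stated in full; the proofs are below) =====
def Claim_equal_maxProfitAssignment : Prop := ∀ (difficulty : List Int) (profit : List Int) (worker : List Int), Dom_maxProfitAssignment difficulty profit worker → Spec_maxProfitAssignment difficulty profit worker (maxProfitAssignment difficulty profit worker)

-- ===== LEMMAS AND PROOFS =====

-- the common yardstick: number of (sorted) jobs whose difficulty is ≤ w
def ubD (d : List Int) (w : Int) : Nat := (d.takeWhile (fun x => decide (x ≤ w))).length

lemma ubD_le (d : List Int) (w : Int) : ubD d w ≤ d.length := by
  simpa [ubD] using (List.takeWhile_sublist (p := fun x => decide (x ≤ w)) (l := d)).length_le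

lemma ubD_lt_of_le (d : List Int) (w : Int) : ∀ i, i < ubD d w → d.getD i 0 ≤ w := by
  induction d with
  | nil => intro i h; simp [ubD] at h
  | cons x t ih =>
    intro i h
    by_cases hx : x ≤ w
    · cases i with
      | zero => simpa using hx
      | succ i =>
        simp [ubD, List.takeWhile, hx] at h
        exact ih i (by simpa [ubD] using h)
    · simp [ubD, List.takeWhile, hx] at h

lemma ubD_stop (d : List Int) (w : Int) (h : ubD d w < d.length) : w < d.getD (ubD d w) 0 := by
  induction d with
  | nil => simp at h
  | cons x t ih =>
    by_cases hx : x ≤ w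
    · have h' : ubD t w < t.length := by
        simpa [ubD, List.takeWhile, hx] using h
      simpa [ubD, List.takeWhile, hx] using ih h'
    · simpa [ubD, List.takeWhile, hx] using lt_of_not_ge hx

-- uniqueness of the stopping point: anything with the two endpoint properties is ubD
lemma ubD_unique (d : List Int) (w : Int) (r : Nat) (hr : r ≤ d.length)
    (h1 : ∀ i, i < r → d.getD i 0 ≤ w)
    (h2 : r < d.length → w < d.getD r 0) : r = ubD d w := by
  rcases Nat.lt_trichotomy r (ubD d w) with h | h | h
  · have := ubD_lt_of_le d w r h
    have := h2 (lt_of_lt_of_le h (ubD_le d w))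
    omega
  · exact h
  · have := h1 (ubD d w) h
    have := ubD_stop d w (lt_of_lt_of_le h hr)
    omega

-- a stable lexicographic sort of pairs is Pairwise ≤ on the first components
lemma insertBy_pairwise_fst (x : Int × Int) :
    ∀ (l : List (Int × Int)), l.Pairwise (fun a b => a.1 ≤ b.1) →
    (PySem.List.insertBy
      (fun a b => decide (a.1 < b.1) || (!decide (b.1 < a.1) && decide (a.2 < b.2))) x l).Pairwise
      (fun a b => a.1 ≤ b.1) := by
  intro l
  induction l with
  | nil => intro _; simp [PySem.List.insertBy]
  | cons y ys ih =>
    intro hp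
    rw [List.pairwise_cons] at hp
    rw [PySem.List.insertBy]
    by_cases hb : (decide (x.1 < y.1) || (!decide (y.1 < x.1) && decide (x.2 < y.2))) = true
    · rw [if_pos hb]
      have hxy : x.1 ≤ y.1 := by
        rcases Bool.or_eq_true_iff.1 hb with h | h
        · exact le_of_lt (of_decide_eq_true h)
        · exact le_of_not_gt (of_decide_eq_false (by simpa using (Bool.and_eq_true_iff.1 h).1))
      refine List.pairwise_cons.2 ⟨?_, List.pairwise_cons.2 hp⟩
      intro z hz
      rcases List.mem_cons.1 hz with rfl | hz
      · exact hxy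
      · exact le_trans hxy (hp.1 z hz)
    · rw [if_neg hb]
      have hyx : y.1 ≤ x.1 := by
        by_contra hcon
        push Not at hcon
        exact hb (by simp [hcon])
      refine List.pairwise_cons.2 ⟨?_, ih hp.2⟩
      intro z hz
      rcases (PySem.List.mem_insertBy _ _ _ _).1 hz with rfl | hz
      · exact hyx
      · exact hp.1 z hz

lemma sorted2_fst_pairwise (xs : List (Int × Int)) :
    (PySem.List.sorted2 xs (fun x => x.1) (fun x => x.2)).Pairwise (fun a b => a.1 ≤ b.1) := by
  rw [PySem.List.sorted2]
  simp only [if_neg (by decide : ¬ (false = true))]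
  generalize hacc : ([] : List (Int × Int)) = acc
  have hacc' : acc.Pairwise (fun a b : Int × Int => a.1 ≤ b.1) := by rw [← hacc]; simp
  clear hacc
  induction xs generalizing acc with
  | nil => simpa using hacc'
  | cons x t ih => exact ih _ (insertBy_pairwise_fst x acc hacc')

-- monotone access in a Pairwise-(≤) list
lemma getD_mono (d : List Int) (hd : d.Pairwise (· ≤ ·)) {i j : Nat}
    (hij : i ≤ j) (hj : j < d.length) : d.getD i 0 ≤ d.getD j 0 := by
  rcases Nat.eq_or_lt_of_le hij with rfl | hij
  · exact le_refl _
  · have hi : i < d.length := lt_trans hij hj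
    have := (List.pairwise_iff_getElem (R := (· ≤ · : Int → Int → Prop)) (l := d)).1 hd i j hi hj hij
    simpa [List.getD_eq_getElem?_getD, List.getElem?_eq_getElem, hi, hj] using this

-- ---------- A's inner while loop ----------
lemma advA_spec (jobs : List (Int × Int)) (w : Int) :
    ∀ (j : Nat) (best : Int), j ≤ jobs.length →
    (∀ i, i < j → (jobs.map (·.1)).getD i 0 ≤ w) →
    best = ((jobs.map (·.2)).take j).foldl max 0 →
    advA jobs w j best =
      (ubD (jobs.map (·.1)) w, ((jobs.map (·.2)).take (ubD (jobs.map (·.1)) w)).foldl max 0) := by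
  intro j best
  induction j, best using advA.induct jobs w with
  | case1 j best h hle ih =>
    intro hj hpre hbest
    rw [advA]
    simp only [h, hle, dite_true, if_true]
    apply ih
    · omega
    · intro i hi
      rcases Nat.lt_or_ge i j with hij | hij
      · exact hpre i hij
      · have : i = j := by omega
        subst this
        simpa [List.getD_eq_getElem?_getD, List.getElem?_eq_getElem, h] using hle
    · have : (jobs.map (·.2)).take (j + 1) = (jobs.map (·.2)).take j ++ [jobs[j].2] := by
        rw [List.take_add_one]
        simp [h]
      rw [this, List.foldl_append, ← hbest]
      simp
  | case2 j best h hgt =>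
    intro hj hpre hbest
    rw [advA]
    simp only [h, hgt, dite_true, if_false]
    have hj' : j = ubD (jobs.map (·.1)) w := by
      apply ubD_unique
      · simpa using hj
      · exact hpre
      · intro hlen
        have : ¬ jobs[j].1 ≤ w := hgt
        have hgetd : (jobs.map (·.1)).getD j 0 = jobs[j].1 := by
          simp [List.getD_eq_getElem?_getD, h]
        omega
    rw [← hj', hbest]
  | case3 j best h =>
    intro hj hpre hbest
    rw [advA]
    simp only [h, dite_false]
    have hjl : j = jobs.length := by simp at h; omega
    have hj' : j = ubD (jobs.map (·.1)) w := by
      apply ubD_unique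
      · simpa using hj
      · exact hpre
      · intro hlen; simp at hlen; omega
    rw [← hj', hbest]

-- ---------- A's outer loop over sorted workers ----------
lemma loopA (jobs : List (Int × Int)) :
    ∀ (ws : List Int), ws.Pairwise (· ≤ ·) →
    ∀ (res : Int) (j : Nat) (best : Int), j ≤ jobs.length →
    (∀ w ∈ ws, ∀ i, i < j → (jobs.map (·.1)).getD i 0 ≤ w) →
    best = ((jobs.map (·.2)).take j).foldl max 0 →
    (ws.foldl (fun (st : Int × Nat × Int) work =>
        let jb := advA jobs work st.2.1 st.2.2
        (st.1 + jb.2, jb.1, jb.2)) (res, j, best)).1 =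
      res + (ws.map (fun w => ((jobs.map (·.2)).take (ubD (jobs.map (·.1)) w)).foldl max 0)).sum := by
  intro ws
  induction ws with
  | nil => intro _ res j best _ _ _; simp
  | cons w t ih =>
    intro hpw res j best hj hpre hbest
    have hpw' := (List.pairwise_cons.1 hpw)
    rw [List.foldl_cons]
    simp only [advA_spec jobs w j best hj (hpre w (by simp)) hbest]
    rw [ih hpw'.2]
    · ring_nf
      simp [add_assoc]
    · simpa using ubD_le (jobs.map (·.1)) w
    · intro w' hw' i hi
      exact le_trans (ubD_lt_of_le _ w i hi) (hpw'.1 w' hw')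
    · rfl

-- ---------- B's prefix-max construction ----------
def pmaxAux : Int → List Int → List Int
  | _, [] => []
  | c, p :: l => (max c p) :: pmaxAux (max c p) l

lemma buildB (jobs : List (Int × Int)) :
    ∀ (ds qs : List Int) (c : Int),
    jobs.foldl (fun (st : List Int × List Int × Int) dp =>
        let cur := max st.2.2 dp.2
        (st.1 ++ [dp.1], st.2.1 ++ [cur], cur)) (ds, qs, c) =
      (ds ++ jobs.map (·.1), qs ++ pmaxAux c (jobs.map (·.2)), (jobs.map (·.2)).foldl max c) := by
  induction jobs with
  | nil => intro ds qs c; simp [pmaxAux]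
  | cons dp t ih =>
    intro ds qs c
    rw [List.foldl_cons, ih]
    simp [pmaxAux]

lemma pmaxAux_getD : ∀ (l : List Int) (c : Int) (k : Nat), k < l.length →
    (pmaxAux c l).getD k 0 = (l.take (k + 1)).foldl max c := by
  intro l
  induction l with
  | nil => intro c k h; simp at h
  | cons p t ih =>
    intro c k h
    cases k with
    | zero => simp [pmaxAux]
    | succ k =>
      simp only [pmaxAux, List.getD_cons_succ, List.take_succ_cons, List.foldl_cons]
      exact ih (max c p) k (by simpa using Nat.lt_of_succ_lt_succ h)

-- ---------- B's binary search finds the same stopping point ----------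
lemma bsearchB_spec (d : List Int) (w : Int) (hd : d.Pairwise (· ≤ ·)) :
    ∀ (lo hi : Nat), lo ≤ hi → hi ≤ d.length →
    (∀ i, i < lo → d.getD i 0 ≤ w) →
    (∀ i, hi ≤ i → i < d.length → w < d.getD i 0) →
    bsearchB d w lo hi = ubD d w := by
  intro lo hi
  induction lo, hi using bsearchB.induct d w with
  | case1 lo hi h mid hmid ih =>
    intro hlh hhi hlo hhiP
    have hmid' : d.getD ((lo + hi) / 2) 0 ≤ w := hmid
    rw [bsearchB]
    simp only [dif_pos h, if_pos hmid']
    apply ih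
    · omega
    · exact hhi
    · intro i hi'
      have him : mid < d.length := by omega
      exact le_trans (getD_mono d hd (by omega) him) hmid
    · exact hhiP
  | case2 lo hi h mid hmid ih =>
    intro hlh hhi hlo hhiP
    have hmid' : ¬ d.getD ((lo + hi) / 2) 0 ≤ w := hmid
    rw [bsearchB]
    simp only [dif_pos h, if_neg hmid']
    apply ih
    · omega
    · omega
    · exact hlo
    · intro i hmi hil
      have him : mid < d.length := by omega
      exact lt_of_lt_of_le (lt_of_not_ge hmid) (getD_mono d hd hmi hil)
  | case3 lo hi h =>
    intro hlh hhi hlo hhiP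
    rw [bsearchB]
    simp only [dif_neg h]
    apply ubD_unique
    · omega
    · exact hlo
    · intro hlen; exact hhiP lo (by omega) hlen

-- ===== VERDICT (by name: the statement is the Claim_ definition above) =====
theorem maxProfitAssignment_spec : Claim_equal_maxProfitAssignment := by
  intro difficulty profit worker _
  unfold Spec_maxProfitAssignment
  simp only [maxProfitAssignment, maxProfitAssignment_alt]
  set jobs := PySem.List.sorted2 (difficulty.zip profit) (fun x => x.1) (fun x => x.2) with hjobs
  set workerS := PySem.List.sorted worker (fun x => x) with hws
  have hpwW : workerS.Pairwise (· ≤ ·) := by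
    simpa using PySem.List.sorted_pairwise worker (fun x => x)
  have hpwJ : (jobs.map (·.1)).Pairwise (· ≤ ·) := by
    rw [List.pairwise_map]
    exact sorted2_fst_pairwise (difficulty.zip profit)
  -- evaluate both sides to the same per-worker sum
  rw [buildB jobs [] [] 0]
  simp only [List.nil_append]
  rw [loopA jobs workerS hpwW 0 0 0 (by omega) (by intro _ _ i hi; omega) (by simp)]
  rw [PySem.List.foldl_add (g := fun w =>
    (if bsearchB (jobs.map (·.1)) w 0 (jobs.map (·.1)).length ≠ 0 then
        (pmaxAux 0 (jobs.map (·.2))).getD (bsearchB (jobs.map (·.1)) w 0 (jobs.map (·.1)).length - 1) 0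
      else 0))]
  simp only [zero_add]
  congr 1
  apply List.map_congr_left
  intro w _
  rw [bsearchB_spec (jobs.map (·.1)) w hpwJ 0 (jobs.map (·.1)).length (by omega) (by omega)
      (by intro i hi; omega) (by intro i h1 h2; omega)]
  by_cases h0 : ubD (jobs.map (·.1)) w = 0
  · simp [h0]
  · have hub := ubD_le (jobs.map (·.1)) w
    have hk : ubD (jobs.map (·.1)) w - 1 < (jobs.map (·.2)).length := by
      simp only [List.length_map] at *
      omega
    rw [if_pos h0, pmaxAux_getD (jobs.map (·.2)) 0 _ hk]
    have : ubD (jobs.map (·.1)) w - 1 + 1 = ubD (jobs.map (·.1)) w := by omega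
    rw [this]
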